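-- pv_equiv track=rewrite | github.com/royw/taskfile_help | scripts/dev-metrics.py | _filter_untested_files
-- ===== SOURCE A (Python) =====
-- def _filter_untested_files(
--     src_files_with_sloc: dict[str, int], tested_modules: set[str], excluded_files: list[str]
-- ) -> list[tuple[str, int]]:
--     """Filter source files to find untested ones."""
--     untested: list[tuple[str, int]] = []
--     for source_file, sloc in src_files_with_sloc.items():
--         normalized: str = str(source_file).replace("\\", "/")
--         if normalized not in tested_modules and not any(x in normalized for x in excluded_files):
--             untested.append((normalized, sloc))
--     untested.sort(key=lambda x: x[1], reverse=True)
--     return untested[:10]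
-- ===== SOURCE B (Python) =====
-- def _insert_desc(items, entry):
--     """items is sorted by sloc descending; place entry after all entries with sloc >= its own."""
--     if items and items[0][1] >= entry[1]:
--         return [items[0]] + _insert_desc(items[1:], entry)
--     return [entry] + items
--
--
-- def _filter_untested_files(
--     src_files_with_sloc: dict[str, int], tested_modules: set[str], excluded_files: list[str]
-- ) -> list[tuple[str, int]]:
--     """Filter source files to find untested ones (single pass keeping only the current top 10)."""
--     top: list[tuple[str, int]] = []
--     for source_file, sloc in src_files_with_sloc.items():
--         normalized: str = str(source_file).replace("\\", "/")
--         if normalized in tested_modules or any(x in normalized for x in excluded_files):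
--             continue
--         top = _insert_desc(top, (normalized, sloc))[:10]
--     return top
-- ===== Notes on version B (the rewrite author's own statement) =====
-- stated objective: alternative
-- what changed: B replaces the full stable sort of all untested files followed by [:10] with a single-pass bounded selection that maintains only the current top-10 list in descending SLOC order via ordered insertion and truncation.
import Mathlib
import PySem

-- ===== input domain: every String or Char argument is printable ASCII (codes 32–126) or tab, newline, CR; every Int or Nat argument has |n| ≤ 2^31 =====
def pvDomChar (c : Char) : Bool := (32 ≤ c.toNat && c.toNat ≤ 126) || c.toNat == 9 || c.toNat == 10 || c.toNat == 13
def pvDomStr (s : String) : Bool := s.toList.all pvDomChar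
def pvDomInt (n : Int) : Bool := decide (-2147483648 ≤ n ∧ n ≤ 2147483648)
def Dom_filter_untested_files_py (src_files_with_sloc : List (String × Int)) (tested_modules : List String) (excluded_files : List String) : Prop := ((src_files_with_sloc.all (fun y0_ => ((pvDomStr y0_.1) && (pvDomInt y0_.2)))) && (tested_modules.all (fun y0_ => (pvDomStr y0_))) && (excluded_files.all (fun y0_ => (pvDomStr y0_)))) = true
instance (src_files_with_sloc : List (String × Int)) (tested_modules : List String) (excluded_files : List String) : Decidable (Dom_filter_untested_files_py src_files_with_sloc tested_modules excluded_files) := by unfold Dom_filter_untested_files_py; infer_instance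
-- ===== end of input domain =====

-- B replaces "filter, full stable sort by SLOC descending, take first 10" with a single pass
-- that maintains only the current top-10 (descending, stable) by ordered insertion + truncation;
-- an alternative algorithm of similar cost (no speed claim).

-- ===== PORT A =====
-- the dict parameter arrives as an association list; .items() iteration order is that of the
-- corresponding Python dict, i.e. PySem.Dict.ofList (first key position, last value wins)
def filter_untested_files_py (src_files_with_sloc : List (String × Int)) (tested_modules : List String) (excluded_files : List String) : List (String × Int) :=
  let untested : List (String × Int) :=
    (PySem.Dict.ofList src_files_with_sloc).items.foldl
      (fun acc p =>
        let normalized : String := PySem.Str.replace p.1 "\\" "/"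
        if !(tested_modules.contains normalized)
            && !(excluded_files.any (fun x => PySem.Str.isIn x normalized))
        then acc ++ [(normalized, p.2)]
        else acc)
      []
  PySem.List.slice (PySem.List.sorted untested (fun x => x.2) true) none (some 10)

-- ===== PORT B =====
-- _insert_desc: items is sorted by sloc descending; place entry after all entries with sloc >= its own
def insertDescB (items : List (String × Int)) (entry : String × Int) : List (String × Int) :=
  match items with
  | [] => [entry]
  | y :: ys => if y.2 ≥ entry.2 then y :: insertDescB ys entry else entry :: y :: ys

def filter_untested_files_py_alt (src_files_with_sloc : List (String × Int)) (tested_modules : List String) (excluded_files : List String) : List (String × Int) :=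
  (PySem.Dict.ofList src_files_with_sloc).items.foldl
    (fun top p =>
      let normalized : String := PySem.Str.replace p.1 "\\" "/"
      if tested_modules.contains normalized
          || excluded_files.any (fun x => PySem.Str.isIn x normalized)
      then top
      else PySem.List.slice (insertDescB top (normalized, p.2)) none (some 10))
    []

-- ===== PRECONDITION & SPEC =====
def Spec_filter_untested_files_py (src_files_with_sloc : List (String × Int)) (tested_modules : List String) (excluded_files : List String) (out : List (String × Int)) : Prop := out = filter_untested_files_py_alt src_files_with_sloc tested_modules excluded_files
instance (src_files_with_sloc : List (String × Int)) (tested_modules : List String) (excluded_files : List String) (out : List (String × Int)) : Decidable (Spec_filter_untested_files_py src_files_with_sloc tested_modules excluded_files out) := by unfold Spec_filter_untested_files_py; infer_instance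

-- ===== CLAIM (what is proved, stated in full; the proofs are below) =====
def Claim_equal_filter_untested_files_py : Prop := ∀ (src_files_with_sloc : List (String × Int)) (tested_modules : List String) (excluded_files : List String), Dom_filter_untested_files_py src_files_with_sloc tested_modules excluded_files → Spec_filter_untested_files_py src_files_with_sloc tested_modules excluded_files (filter_untested_files_py src_files_with_sloc tested_modules excluded_files)

-- ===== LEMMAS AND PROOFS =====

-- the comparison sorted(..., key=x.2, reverse=True) inserts by
def befB (a b : String × Int) : Bool := decide (b.2 < a.2)

-- B's hand-written insertion is PySem's insertBy for that comparison
lemma insertDescB_eq_insertBy (e : String × Int) :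
    ∀ (s : List (String × Int)), insertDescB s e = PySem.List.insertBy befB e s := by
  intro s
  induction s with
  | nil => rfl
  | cons y ys ih =>
      simp only [insertDescB, PySem.List.insertBy, befB]
      by_cases h : y.2 ≥ e.2
      · simp [h, not_lt.mpr h, ih]
      · simp [h, lt_of_not_ge h]

-- xs[:10] is take 10
lemma slice_ten (xs : List (String × Int)) :
    PySem.List.slice xs none (some 10) = xs.take 10 := by
  have : (10 : Int) = ((10 : Nat) : Int) := by norm_num
  rw [this, PySem.List.slice_to_natCast]

-- truncation commutes with ordered insertion
lemma take_insertBy (n : Nat) (e : String × Int) :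
    ∀ (s : List (String × Int)),
      (PySem.List.insertBy befB e (s.take n)).take n = (PySem.List.insertBy befB e s).take n := by
  induction n with
  | zero =>
      intro s
      cases s <;> simp [PySem.List.insertBy]
  | succ m ih =>
      intro s
      cases s with
      | nil => rfl
      | cons y ys =>
          simp only [List.take_succ_cons, PySem.List.insertBy]
          split
          · cases m <;> simp [List.take_take]
          · simp [List.take_succ_cons, ih ys]

-- folding "insert then truncate" is the truncation of the insertion-sort fold
lemma foldl_insert_take (n : Nat) :
    ∀ (l : List (String × Int)) (s : List (String × Int)),
      l.foldl (fun t e => (PySem.List.insertBy befB e t).take n) (s.take n)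
        = (l.foldl (fun t e => PySem.List.insertBy befB e t) s).take n := by
  intro l
  induction l with
  | nil => intro s; rfl
  | cons x xs ih =>
      intro s
      simp only [List.foldl_cons]
      rw [take_insertBy n x s, ih]

-- a skip-on-condition fold is the plain fold over the filtered, mapped list
lemma foldl_skip_filter {β : Type} (c : String × Int → Bool) (f : String × Int → String × Int)
    (g : β → String × Int → β) :
    ∀ (l : List (String × Int)) (s : β),
      l.foldl (fun t p => if c p then t else g t (f p)) s
        = ((l.filter (fun p => !c p)).map f).foldl g s := by
  intro l
  induction l with
  | nil => intro s; rfl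
  | cons x xs ih =>
      intro s
      simp only [List.foldl_cons, List.filter_cons]
      by_cases h : c x
      · simp [h, ih]
      · simp [h, ih]

-- ===== VERDICT (by name: the statement is the Claim_ definition above) =====
theorem filter_untested_files_py_spec : Claim_equal_filter_untested_files_py := by
  intro src tm ex _hdom
  unfold Spec_filter_untested_files_py filter_untested_files_py filter_untested_files_py_alt
  simp only [insertDescB_eq_insertBy, slice_ten]
  set items := (PySem.Dict.ofList src).items with hitems
  set c : String × Int → Bool := fun p =>
    tm.contains (PySem.Str.replace p.1 "\\" "/")
      || ex.any (fun x => PySem.Str.isIn x (PySem.Str.replace p.1 "\\" "/")) with hc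
  set f : String × Int → String × Int := fun p => (PySem.Str.replace p.1 "\\" "/", p.2) with hf
  have hA : items.foldl
      (fun acc p =>
        if !(tm.contains (PySem.Str.replace p.1 "\\" "/"))
            && !(ex.any (fun x => PySem.Str.isIn x (PySem.Str.replace p.1 "\\" "/")))
        then acc ++ [(PySem.Str.replace p.1 "\\" "/", p.2)] else acc) []
      = (items.filter (fun p => !c p)).map f := by
    have := PySem.List.foldl_append_if (fun p => !c p) f items []
    simpa [hc, hf, Bool.not_or] using this
  rw [hA, PySem.List.sorted_rev_eq_foldl_insertBy]
  have hB : items.foldl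
      (fun top p =>
        if c p then top
        else (PySem.List.insertBy befB (PySem.Str.replace p.1 "\\" "/", p.2) top).take 10) []
      = ((items.filter (fun p => !c p)).map f).foldl
          (fun t e => (PySem.List.insertBy befB e t).take 10) [] := by
    exact foldl_skip_filter c f (fun t e => (PySem.List.insertBy befB e t).take 10) items []
  rw [hB]
  have h0 : ([] : List (String × Int)) = ([] : List (String × Int)).take 10 := rfl
  rw [h0, foldl_insert_take 10]
  rfl
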